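-- pv_equiv track=rewrite | github.com/AntonioEscobar01/IIC2233-2023-1-Resuelto | Tareas/T0/functions.py | verificar_alcance_bomba
-- ===== SOURCE A (Python) =====
-- def verificar_alcance_bomba(tablero: list, coordenada: tuple) -> int:
--     elemento_tablero = tablero[coordenada[0]][coordenada[1]]
--     if elemento_tablero in ['-', 'T']:
--         return 0
--     else:
--         fila_elemento = tablero[coordenada[0]]
--         columna_elemento = [fila[coordenada[1]] for fila in tablero]
--         alcance = contar_casillas(fila_elemento, coordenada[1])
--         alcance += contar_casillas(columna_elemento, coordenada[0])
--     return alcance + 1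
--
-- def contar_casillas(lista_contar: list, posicion: int) -> int:
--     cantidad_casillas = 0
--     for posicion_atras in reversed(range(0, posicion)):
--         if lista_contar[posicion_atras] != 'T':
--             cantidad_casillas += 1
--         else:
--             break
--     for posicion_adelante in range(posicion+1, len(lista_contar)):
--         if lista_contar[posicion_adelante] != 'T':
--             cantidad_casillas += 1
--         else:
--             break
--     return cantidad_casillas
-- ===== SOURCE B (Python) =====
-- def verificar_alcance_bomba(tablero: list, coordenada: tuple) -> int:
--     i, j = coordenada
--     if tablero[i][j] in ('-', 'T'):
--         return 0
--     fila = tablero[i]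
--     columna = [fila_tab[j] for fila_tab in tablero]
--     return _bloque(fila, j) + _bloque(columna, i) - 1
--
-- def _bloque(lista: list, posicion: int) -> int:
--     inicio = 0
--     for fin, casilla in enumerate(lista):
--         if casilla == 'T':
--             if inicio <= posicion < fin:
--                 return fin - inicio
--             inicio = fin + 1
--     return len(lista) - inicio
-- ===== Notes on version B (the rewrite author's own statement) =====
-- stated objective: alternative
-- what changed: B replaces A's two outward scan-until-barrier passes per line with a single forward pass that partitions the whole row/column into 'T'-delimited blocks and returns the length of the block containing the coordinate (answer = row block + column block - 1).
-- outside the precondition, e.g. on verificar_alcance_bomba([['B', 'o'], ['o', 'o']], (0, -1)): A returns 4, B returns 3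
import Mathlib
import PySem

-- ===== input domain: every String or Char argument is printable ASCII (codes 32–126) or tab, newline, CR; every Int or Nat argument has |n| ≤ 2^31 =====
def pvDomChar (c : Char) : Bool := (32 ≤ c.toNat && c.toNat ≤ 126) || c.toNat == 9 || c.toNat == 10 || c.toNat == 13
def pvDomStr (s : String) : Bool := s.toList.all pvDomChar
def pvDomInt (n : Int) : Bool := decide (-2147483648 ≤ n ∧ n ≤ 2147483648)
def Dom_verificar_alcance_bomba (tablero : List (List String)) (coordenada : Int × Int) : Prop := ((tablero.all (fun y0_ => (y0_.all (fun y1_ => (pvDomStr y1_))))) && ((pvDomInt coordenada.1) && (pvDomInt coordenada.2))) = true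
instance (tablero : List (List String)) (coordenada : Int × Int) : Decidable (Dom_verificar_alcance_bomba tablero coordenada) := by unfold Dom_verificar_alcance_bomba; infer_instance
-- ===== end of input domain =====

-- B replaces A's outward scan-until-barrier passes with a single forward pass that
-- partitions each line into 'T'-delimited blocks and returns the containing block's
-- length (objective: alternative).

-- ===== PORT A =====
-- helper: one break-able scan over a list of indices (a `for … else break` loop body)
def pvCountScan (lista : List String) (idxs : List Int) : Int :=
  match idxs with
  | [] => 0
  | k :: rest =>
    if PySem.List.pyGetD lista k "" ≠ "T" then 1 + pvCountScan lista rest else 0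

def contar_casillas (lista_contar : List String) (posicion : Int) : Int :=
  pvCountScan lista_contar ((PySem.List.pyRange 0 posicion 1).reverse)
  + pvCountScan lista_contar (PySem.List.pyRange (posicion + 1) (lista_contar.length : Int) 1)

def verificar_alcance_bomba (tablero : List (List String)) (coordenada : Int × Int) : Int :=
  let elemento := PySem.List.pyGetD (PySem.List.pyGetD tablero coordenada.1 []) coordenada.2 ""
  if elemento = "-" ∨ elemento = "T" then 0
  else
    let fila := PySem.List.pyGetD tablero coordenada.1 []
    let columna := tablero.map (fun f => PySem.List.pyGetD f coordenada.2 "")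
    contar_casillas fila coordenada.2 + contar_casillas columna coordenada.1 + 1

-- ===== PORT B =====
-- the enumerate-loop of Source B's _bloque: `inicio` starts the current 'T'-free block,
-- `fin` is the current index, `total` is len(lista)
def pvBloqueGo (p total : Int) (rest : List String) (inicio fin : Int) : Int :=
  match rest with
  | [] => total - inicio
  | casilla :: xs =>
    if casilla = "T" then
      if inicio ≤ p ∧ p < fin then fin - inicio
      else pvBloqueGo p total xs (fin + 1) (fin + 1)
    else pvBloqueGo p total xs inicio (fin + 1)

def pvBloque (lista : List String) (posicion : Int) : Int :=
  pvBloqueGo posicion (lista.length : Int) lista 0 0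

def verificar_alcance_bomba_alt (tablero : List (List String)) (coordenada : Int × Int) : Int :=
  let i := coordenada.1
  let j := coordenada.2
  let elemento := PySem.List.pyGetD (PySem.List.pyGetD tablero i []) j ""
  if elemento = "-" ∨ elemento = "T" then 0
  else
    let fila := PySem.List.pyGetD tablero i []
    let columna := tablero.map (fun f => PySem.List.pyGetD f j "")
    pvBloque fila j + pvBloque columna i - 1

-- ===== PRECONDITION & SPEC =====
-- Pre_ admits the natural domain (non-negative in-bounds coordinate with every row long
-- enough for the column extraction) plus any Python-indexable coordinate whose cell is
-- '-' or 'T' (there A returns 0 before touching anything else, and so does B); outside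
-- it A raises IndexError or relies on Python's negative-index wraparound, an artefact
-- no maintainer would specify.
def Pre_verificar_alcance_bomba (tablero : List (List String)) (coordenada : Int × Int) : Prop :=
  (-(tablero.length : Int) ≤ coordenada.1 ∧ coordenada.1 < (tablero.length : Int) ∧
   -((PySem.List.pyGetD tablero coordenada.1 []).length : Int) ≤ coordenada.2 ∧
   coordenada.2 < ((PySem.List.pyGetD tablero coordenada.1 []).length : Int) ∧
   (PySem.List.pyGetD (PySem.List.pyGetD tablero coordenada.1 []) coordenada.2 "" = "-" ∨
    PySem.List.pyGetD (PySem.List.pyGetD tablero coordenada.1 []) coordenada.2 "" = "T")) ∨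
  (0 ≤ coordenada.1 ∧ coordenada.1 < (tablero.length : Int) ∧
   0 ≤ coordenada.2 ∧ coordenada.2 < ((PySem.List.pyGetD tablero coordenada.1 []).length : Int) ∧
   ∀ r ∈ tablero, coordenada.2 < (r.length : Int))

instance (tablero : List (List String)) (coordenada : Int × Int) : Decidable (Pre_verificar_alcance_bomba tablero coordenada) := by
  unfold Pre_verificar_alcance_bomba; infer_instance

def pvWitness_verificar_alcance_bomba : List (List String) × (Int × Int) :=
  ([["B", "-"], ["T", "-"]], (0, 0))

def Spec_verificar_alcance_bomba (tablero : List (List String)) (coordenada : Int × Int) (out : Int) : Prop := out = verificar_alcance_bomba_alt tablero coordenada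
instance (tablero : List (List String)) (coordenada : Int × Int) (out : Int) : Decidable (Spec_verificar_alcance_bomba tablero coordenada out) := by unfold Spec_verificar_alcance_bomba; infer_instance

-- ===== CLAIM (what is proved, stated in full; the proofs are below) =====
def Claim_equal_verificar_alcance_bomba : Prop := ∀ (tablero : List (List String)) (coordenada : Int × Int), Dom_verificar_alcance_bomba tablero coordenada → Pre_verificar_alcance_bomba tablero coordenada → Spec_verificar_alcance_bomba tablero coordenada (verificar_alcance_bomba tablero coordenada)

-- ===== LEMMAS AND PROOFS =====

-- Phase 2 of pvBloqueGo: the position p is already inside the current block;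
-- the loop returns start-of-block-to-first-T (or to the end) minus inicio.
theorem pvBloqueGo_phase2 (p : Int) : ∀ (xs : List String) (total inicio fin : Int),
    total = fin + (xs.length : Int) → inicio ≤ p → p < fin →
    pvBloqueGo p total xs inicio fin
      = fin + ((xs.takeWhile (fun s => s ≠ "T")).length : Int) - inicio := by
  intro xs
  induction xs with
  | nil => intro total inicio fin ht _ _; simp [pvBloqueGo, ht]
  | cons x xs ih =>
    intro total inicio fin ht hip hpf
    by_cases hx : x = "T"
    · simp [pvBloqueGo, hx, hip, hpf]
    · have : pvBloqueGo p total (x :: xs) inicio fin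
          = pvBloqueGo p total xs inicio (fin + 1) := by
        simp [pvBloqueGo, hx]
      rw [this, ih total inicio (fin + 1) (by simp at ht ⊢; omega) hip (by omega)]
      simp [hx]
      omega

-- Phase 1: the loop has not yet reached p (at relative position q in rest);
-- d = fin - inicio is the length of the open block before rest.
theorem pvBloqueGo_phase1 (p : Int) : ∀ (xs : List String) (q : Nat) (d fin : Int),
    0 ≤ d → fin + (q : Int) = p → (hq : q < xs.length) → xs[q] ≠ "T" →
    pvBloqueGo p (fin + (xs.length : Int)) xs (fin - d) fin
      = (if ((xs.take q).reverse.takeWhile (fun s => s ≠ "T")).length = q then d else 0)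
        + (((xs.take q).reverse.takeWhile (fun s => s ≠ "T")).length : Int)
        + (((xs.drop (q + 1)).takeWhile (fun s => s ≠ "T")).length : Int) + 1 := by
  intro xs
  induction xs with
  | nil => intro q d fin _ _ hq; exact absurd hq (by simp)
  | cons x xs ih =>
    intro q d fin hd hfq hq hxq
    have harg : fin + (((x :: xs).length : Nat) : Int) = (fin + 1) + (xs.length : Int) := by
      simp only [List.length_cons]
      push_cast
      ring
    match q with
    | 0 =>
      have hx : x ≠ "T" := by simpa using hxq
      have hfp : fin = p := by simpa using hfq
      have h2 : pvBloqueGo p (fin + ((x :: xs).length : Int)) (x :: xs) (fin - d) fin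
          = pvBloqueGo p (fin + ((x :: xs).length : Int)) xs (fin - d) (fin + 1) := by
        simp only [pvBloqueGo, if_neg hx]
      rw [h2, harg, pvBloqueGo_phase2 p xs _ _ _ rfl (by omega) (by omega)]
      simp
      omega
    | Nat.succ q' =>
      have hq' : q' < xs.length := by simpa using hq
      have hxq' : xs[q'] ≠ "T" := by simpa using hxq
      have hlenL : (xs.take q').reverse.length = q' := by
        simp only [List.length_reverse, List.length_take]
        omega
      have hlenq : ((xs.take q').reverse.takeWhile (fun s => s ≠ "T")).length ≤ q' := by
        have h1 := ((xs.take q').reverse.takeWhile_prefix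
          (fun s => decide (s ≠ "T"))).length_le
        omega
      by_cases hx : x = "T"
      · have hcond : ¬ (fin - d ≤ p ∧ p < fin) := by push_cast at hfq; omega
        have h2 : pvBloqueGo p (fin + ((x :: xs).length : Int)) (x :: xs) (fin - d) fin
            = pvBloqueGo p ((fin + 1) + (xs.length : Int)) xs ((fin + 1) - 0) (fin + 1) := by
          simp only [pvBloqueGo, if_pos hx, if_neg hcond, harg, sub_zero]
        rw [h2, ih q' 0 (fin + 1) le_rfl (by push_cast at hfq ⊢; omega) hq' hxq']
        have htw : ((x :: xs).take (q' + 1)).reverse.takeWhile (fun s => s ≠ "T")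
            = (xs.take q').reverse.takeWhile (fun s => s ≠ "T") := by
          rw [List.take_succ_cons, List.reverse_cons, List.takeWhile_append]
          split_ifs with h
          · have he := ((xs.take q').reverse.takeWhile_prefix
              (fun s => decide (s ≠ "T"))).eq_of_length h
            have hTW : List.takeWhile (fun s => decide (s ≠ "T")) [x] = [] := by simp [hx]
            rw [hTW, List.append_nil]
            exact he.symm
          · rfl
        rw [htw]
        have hne : ((xs.take q').reverse.takeWhile (fun s => s ≠ "T")).length ≠ q' + 1 := by
          omega
        simp only [List.drop_succ_cons, if_neg hne]
        split_ifs with h <;> omega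
      · have h2 : pvBloqueGo p (fin + ((x :: xs).length : Int)) (x :: xs) (fin - d) fin
            = pvBloqueGo p ((fin + 1) + (xs.length : Int)) xs ((fin + 1) - (d + 1)) (fin + 1) := by
          have hst : fin - d = (fin + 1) - (d + 1) := by ring
          simp only [pvBloqueGo, if_neg hx, harg, hst]
        rw [h2, ih q' (d + 1) (fin + 1) (by omega) (by push_cast at hfq ⊢; omega) hq' hxq']
        have htw : ((x :: xs).take (q' + 1)).reverse.takeWhile (fun s => s ≠ "T")
            = if ((xs.take q').reverse.takeWhile (fun s => s ≠ "T")).length = q'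
              then (xs.take q').reverse ++ [x]
              else (xs.take q').reverse.takeWhile (fun s => s ≠ "T") := by
          rw [List.take_succ_cons, List.reverse_cons, List.takeWhile_append, hlenL]
          split_ifs with h
          · have hTW : List.takeWhile (fun s => decide (s ≠ "T")) [x] = [x] := by simp [hx]
            rw [hTW]
          · rfl
        rw [htw]
        by_cases h : ((xs.take q').reverse.takeWhile (fun s => s ≠ "T")).length = q'
        · have hlen2 : ((xs.take q').reverse ++ [x]).length = q' + 1 := by
            simp [hlenL]
          rw [if_pos h]
          simp only [hlen2, List.drop_succ_cons, h, if_pos rfl]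
          push_cast
          omega
        · have hne : ((xs.take q').reverse.takeWhile (fun s => s ≠ "T")).length ≠ q' + 1 := by
            omega
          rw [if_neg h]
          simp only [List.drop_succ_cons, if_neg h, if_neg hne]

-- A's forward scan equals takeWhile of the dropped suffix
theorem countScan_fwd (l : List String) : ∀ (n k : Nat), l.length ≤ k + n →
    pvCountScan l (PySem.List.pyRange (k : Int) (l.length : Int) 1)
      = (((l.drop k).takeWhile (fun s => s ≠ "T")).length : Int) := by
  intro n
  induction n with
  | zero =>
    intro k hk
    rw [PySem.List.pyRange_one_eq_nil (by omega), List.drop_eq_nil_of_le (by omega)]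
    simp [pvCountScan]
  | succ n ih =>
    intro k hk
    by_cases hlt : k < l.length
    · have hget : PySem.List.pyGetD l (k : Int) "" = l[k] := by
        rw [PySem.List.pyGetD_natCast]
        exact List.getD_eq_getElem l "" hlt
      have hdrop : l.drop k = l[k] :: l.drop (k + 1) := (List.getElem_cons_drop hlt).symm
      rw [PySem.List.pyRange_one_cons (by omega)]
      simp only [pvCountScan, hget]
      by_cases hx : l[k] = "T"
      · rw [if_neg (not_not_intro hx), hdrop]
        simp only [List.takeWhile_cons]
        simp [hx]
      · rw [if_pos hx]
        have hcast : ((k : Int) + 1) = ((k + 1 : Nat) : Int) := by push_cast; ring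
        rw [hcast, ih (k + 1) (by omega)]
        have hlen : ((l.drop k).takeWhile (fun s => s ≠ "T")).length
            = ((l.drop (k + 1)).takeWhile (fun s => s ≠ "T")).length + 1 := by
          rw [hdrop]
          simp only [List.takeWhile_cons]
          simp [hx]
        rw [hlen]
        push_cast
        ring
    · rw [PySem.List.pyRange_one_eq_nil (by omega), List.drop_eq_nil_of_le (by omega)]
      simp [pvCountScan]

-- A's backward scan equals takeWhile of the reversed prefix
theorem countScan_bwd (l : List String) : ∀ (p : Nat), p ≤ l.length →
    pvCountScan l ((PySem.List.pyRange 0 (p : Int) 1).reverse)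
      = (((l.take p).reverse.takeWhile (fun s => s ≠ "T")).length : Int) := by
  intro p
  induction p with
  | zero => intro _; simp [PySem.List.pyRange_one_eq_nil, pvCountScan]
  | succ p ih =>
    intro hp
    have hplt : p < l.length := by omega
    have hcast : ((p + 1 : Nat) : Int) = (p : Int) + 1 := by push_cast; ring
    rw [hcast, PySem.List.pyRange_one_succ_right (by omega), List.reverse_append]
    have hget : PySem.List.pyGetD l (p : Int) "" = l[p] := by
      rw [PySem.List.pyGetD_natCast]
      exact List.getD_eq_getElem l "" hplt
    have htake : (l.take (p + 1)).reverse = l[p] :: (l.take p).reverse := by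
      rw [List.take_add_one, List.getElem?_eq_getElem hplt]
      simp
    rw [htake]
    simp only [List.reverse_singleton, List.singleton_append, pvCountScan, hget]
    by_cases hx : l[p] = "T"
    · rw [if_neg (not_not_intro hx)]
      simp only [List.takeWhile_cons]
      simp [hx]
    · rw [if_pos hx, ih (by omega)]
      have hlen : ((l[p] :: (l.take p).reverse).takeWhile (fun s => s ≠ "T")).length
          = (((l.take p).reverse).takeWhile (fun s => s ≠ "T")).length + 1 := by
        simp only [List.takeWhile_cons]
        simp [hx]
      rw [hlen]
      push_cast
      ring

-- bridge: on an in-bounds non-'T' position, B's block length = A's two scans + 1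
theorem bloque_eq_contar (l : List String) (p : Int) (h0 : 0 ≤ p) (hlt : p < (l.length : Int))
    (hT : PySem.List.pyGetD l p "" ≠ "T") :
    pvBloque l p = contar_casillas l p + 1 := by
  have hq : p = ((p.toNat : Nat) : Int) := (Int.toNat_of_nonneg h0).symm
  have hqlt : p.toNat < l.length := by omega
  have hgl : PySem.List.pyGetD l p "" = l[p.toNat] := PySem.List.pyGetD_eq_getElem l "" h0 hlt
  have hxq : l[p.toNat] ≠ "T" := hgl ▸ hT
  have hB : pvBloque l p
      = (((l.take p.toNat).reverse.takeWhile (fun s => s ≠ "T")).length : Int)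
        + (((l.drop (p.toNat + 1)).takeWhile (fun s => s ≠ "T")).length : Int) + 1 := by
    unfold pvBloque
    have := pvBloqueGo_phase1 p l p.toNat 0 0 le_rfl (by omega) hqlt hxq
    simp only [sub_zero, zero_add] at this
    rw [this]
    split_ifs <;> ring
  have hA : contar_casillas l p
      = (((l.take p.toNat).reverse.takeWhile (fun s => s ≠ "T")).length : Int)
        + (((l.drop (p.toNat + 1)).takeWhile (fun s => s ≠ "T")).length : Int) := by
    unfold contar_casillas
    rw [hq, countScan_bwd l p.toNat (by omega)]
    have : ((p.toNat : Nat) : Int) + 1 = ((p.toNat + 1 : Nat) : Int) := by push_cast; ring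
    rw [this, countScan_fwd l l.length (p.toNat + 1) (by omega)]
    simp only [Int.toNat_natCast]
  rw [hA, hB]

-- ===== VERDICT (by name: the statement is the Claim_ definition above) =====
theorem verificar_alcance_bomba_spec : Claim_equal_verificar_alcance_bomba := by
  intro tablero coordenada _ hpre
  unfold Spec_verificar_alcance_bomba verificar_alcance_bomba verificar_alcance_bomba_alt
  set i := coordenada.1 with hidef
  set j := coordenada.2 with hjdef
  set row := PySem.List.pyGetD tablero i [] with hrowdef
  by_cases hel : PySem.List.pyGetD row j "" = "-" ∨ PySem.List.pyGetD row j "" = "T"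
  · rw [if_pos hel, if_pos hel]
  · rw [if_neg hel, if_neg hel]
    obtain ⟨hi0, hin, hj0, hjlen, hall⟩ :
        0 ≤ i ∧ i < (tablero.length : Int) ∧ 0 ≤ j ∧ j < (row.length : Int) ∧
          ∀ r ∈ tablero, j < (r.length : Int) := by
      rcases hpre with ⟨_, _, _, _, h⟩ | h
      · exact absurd h hel
      · exact h
    have hT : PySem.List.pyGetD row j "" ≠ "T" := fun h => hel (Or.inr h)
    set col := tablero.map (fun f => PySem.List.pyGetD f j "") with hcoldef
    have hcollen : col.length = tablero.length := by rw [hcoldef]; exact List.length_map ..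
    have hcolget : PySem.List.pyGetD col i "" = PySem.List.pyGetD row j "" := by
      rw [hcoldef, PySem.List.pyGetD_eq_getElem _ _ hi0 (by simpa [List.length_map] using hin)]
      simp [hrowdef, PySem.List.pyGetD_eq_getElem tablero [] hi0 hin]
    have hcolT : PySem.List.pyGetD col i "" ≠ "T" := hcolget ▸ hT
    show contar_casillas row j + contar_casillas col i + 1
        = pvBloque row j + pvBloque col i - 1
    rw [bloque_eq_contar row j hj0 hjlen hT,
        bloque_eq_contar col i hi0 (by rw [hcollen]; exact hin) hcolT]
    ring
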